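-- pv_equiv track=rewrite | github.com/dianaabdirahmanova711-tech/homeworks | lab1/1.task.py | analyze_strings_list
-- ===== SOURCE A (Python) =====
-- def analyze_strings_list(words):
--     seen = set()
--     result = []
--
--     for word in words:
--         if any(char.isdigit() for char in word):
--             continue
--
--         if len(word) % 2 == 0:
--             processed = word[::-1]
--         else:
--             processed = word.upper()
--
--         if processed not in seen:
--             seen.add(processed)
--             result.append(processed)
--
--     return result
-- ===== SOURCE B (Python) =====
-- def analyze_strings_list(words):
--     # Back-to-front rebuild: walk the list in reverse, prepend each surviving
--     # transformed word and strip its later duplicates from the result built so far.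
--     # No seen-set: dedup happens by filtering the partial result.
--     result = []
--     for word in reversed(words):
--         if any(c.isdigit() for c in word):
--             continue
--         t = word[::-1] if len(word) % 2 == 0 else word.upper()
--         result = [t] + [x for x in result if x != t]
--     return result
-- ===== Notes on version B (the rewrite author's own statement) =====
-- stated objective: alternative
-- what changed: Replaces the forward pass with a seen-set by a backward traversal that prepends each surviving transformed word and deletes its later duplicates by filtering the partial result, so dedup state is the output itself and no auxiliary set exists.
import Mathlib
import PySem

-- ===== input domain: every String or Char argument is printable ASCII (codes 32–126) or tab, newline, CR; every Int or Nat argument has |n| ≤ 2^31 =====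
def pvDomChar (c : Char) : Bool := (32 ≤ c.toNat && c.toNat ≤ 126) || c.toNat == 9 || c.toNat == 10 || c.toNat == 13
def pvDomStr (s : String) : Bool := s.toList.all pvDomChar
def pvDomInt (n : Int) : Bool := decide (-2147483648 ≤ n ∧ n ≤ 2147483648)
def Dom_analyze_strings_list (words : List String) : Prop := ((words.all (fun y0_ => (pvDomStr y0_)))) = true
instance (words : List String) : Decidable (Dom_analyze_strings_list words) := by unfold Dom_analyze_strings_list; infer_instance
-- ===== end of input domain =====

-- B replaces A's forward pass with a seen-set by a backward traversal that prepends each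
-- surviving transformed word and filters its later duplicates out of the partial result;
-- same values, no speed claim (objective: alternative).

-- ===== PORT A =====
-- word[::-1] is ported as String.ofList word.toList.reverse (exact for Python's full reverse slice)
def analyze_strings_list (words : List String) : List String :=
  let st := words.foldl (fun (st : PySem.Set String × List String) word =>
    if word.toList.any PySem.Chars.isdigit then st
    else
      let processed :=
        if PySem.Str.len word % 2 == 0 then String.ofList word.toList.reverse
        else PySem.Str.upper word
      if PySem.Set.contains st.1 processed then st
      else (PySem.Set.add st.1 processed, st.2 ++ [processed]))
    (PySem.Set.empty, [])
  st.2

-- ===== PORT B =====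
-- 'for word in reversed(words)' with result rebuilt as [t] + [x for x in result if x != t]
def analyze_strings_list_alt (words : List String) : List String :=
  words.reverse.foldl (fun (result : List String) word =>
    if word.toList.any PySem.Chars.isdigit then result
    else
      let t :=
        if PySem.Str.len word % 2 == 0 then String.ofList word.toList.reverse
        else PySem.Str.upper word
      t :: result.filter (fun x => x != t)) []

-- ===== PRECONDITION & SPEC =====
def Spec_analyze_strings_list (words : List String) (out : List String) : Prop := out = analyze_strings_list_alt words
instance (words : List String) (out : List String) : Decidable (Spec_analyze_strings_list words out) := by unfold Spec_analyze_strings_list; infer_instance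

-- ===== CLAIM (what is proved, stated in full; the proofs are below) =====
def Claim_equal_analyze_strings_list : Prop := ∀ (words : List String), Dom_analyze_strings_list words → Spec_analyze_strings_list words (analyze_strings_list words)

-- ===== LEMMAS AND PROOFS =====

def pvTrans (w : String) : String :=
  if PySem.Str.len w % 2 == 0 then String.ofList w.toList.reverse else PySem.Str.upper w

-- the head-keep / strip-duplicates recursion B's backward loop computes
def pvRec : List String → List String
  | [] => []
  | t :: ts => t :: (pvRec ts).filter (fun x => x != t)

-- A's fold: the (seen, result) state stays diagonal; fold = Set.ofList of the transformed survivors.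
lemma analyze_loop (ws : List String) (s : List String) :
    (ws.foldl (fun (st : PySem.Set String × List String) word =>
      if word.toList.any PySem.Chars.isdigit then st
      else
        let processed := pvTrans word
        if PySem.Set.contains st.1 processed then st
        else (PySem.Set.add st.1 processed, st.2 ++ [processed])) (s, s)).2
    = ((ws.filter (fun w => !(w.toList.any PySem.Chars.isdigit))).map pvTrans).foldl
        PySem.Set.add s := by
  induction ws generalizing s with
  | nil => rfl
  | cons w ws ih =>
    simp only [List.foldl_cons, List.filter_cons]
    by_cases hd : w.toList.any PySem.Chars.isdigit
    · simpa [hd] using ih s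
    · by_cases hc : pvTrans w ∈ s
      · simpa [hd, hc, PySem.Set.add, PySem.Set.contains] using ih s
      · simpa [hd, hc, PySem.Set.add, PySem.Set.contains] using ih (s ++ [pvTrans w])

-- B's backward fold = pvRec on the transformed survivors
lemma alt_loop (ws : List String) :
    ws.reverse.foldl (fun (result : List String) word =>
      if word.toList.any PySem.Chars.isdigit then result
      else
        let t := pvTrans word
        t :: result.filter (fun x => x != t)) []
    = pvRec ((ws.filter (fun w => !(w.toList.any PySem.Chars.isdigit))).map pvTrans) := by
  rw [List.foldl_reverse]
  induction ws with
  | nil => rfl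
  | cons w ws ih =>
    simp only [List.foldr_cons, List.filter_cons]
    by_cases hd : w.toList.any PySem.Chars.isdigit
    · simp only [hd, Bool.not_true, if_true, if_false]
      exact ih
    · simp only [eq_self_iff_true, hd, Bool.not_false, if_true, if_false, if_neg hd,
        Bool.not_eq_true', Bool.not_true]
      simp only [if_pos rfl, List.map_cons, pvRec]
      rw [ih]
      simp

-- first-occurrence dedup (foldl Set.add) satisfies the head-keep recursion
lemma ofList_eq_pvRec (l : List String) (s : List String) :
    l.foldl PySem.Set.add s = s ++ (pvRec l).filter (fun x => !s.contains x) := by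
  induction l generalizing s with
  | nil => simp [pvRec]
  | cons t ts ih =>
    simp only [List.foldl_cons, pvRec, List.filter_cons]
    by_cases hc : t ∈ s
    · have h1 : PySem.Set.add s t = s := by simp [PySem.Set.add, PySem.Set.contains, hc]
      rw [h1, ih]
      have hb : (!s.contains t) = false := by simp [hc]
      rw [hb]
      simp only [if_neg (Bool.false_ne_true), List.filter_filter]
      congr 1
      apply List.filter_congr
      intro x _
      by_cases hxt : x = t
      · subst hxt; simp [hc]
      · simp [hxt]
    · have h1 : PySem.Set.add s t = s ++ [t] := by simp [PySem.Set.add, PySem.Set.contains, hc]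
      rw [h1, ih]
      have hb : (!s.contains t) = true := by simp [hc]
      rw [hb]
      simp only [List.append_assoc, List.singleton_append, List.filter_filter]
      congr 2
      apply List.filter_congr
      intro x _
      by_cases hxt : x = t
      · subst hxt; simp
      · simp [hxt]

-- ===== VERDICT (by name: the statement is the Claim_ definition above) =====
theorem analyze_strings_list_spec : Claim_equal_analyze_strings_list := by
  intro words _
  show analyze_strings_list words = analyze_strings_list_alt words
  have hA : analyze_strings_list words =
      ((words.filter (fun w => !(w.toList.any PySem.Chars.isdigit))).map pvTrans).foldl
        PySem.Set.add [] := analyze_loop words []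
  have hB : analyze_strings_list_alt words =
      pvRec ((words.filter (fun w => !(w.toList.any PySem.Chars.isdigit))).map pvTrans) :=
    alt_loop words
  rw [hA, hB, ofList_eq_pvRec]
  simp
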